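-- pv_equiv track=rewrite | github.com/nbrookins/danger-finger | tools/gcode-swap.py | default_colors_for_tools
-- ===== SOURCE A (Python) =====
-- from typing import Dict, List, Optional, Sequence, Set, Tuple
--
-- def default_colors_for_tools(tools: Sequence[int], extruder_hex: Sequence[str]) -> Dict[int, str]:
--     """Map tool index -> #RRGGBB from slicer extruder_colour or distinct fallbacks."""
--     fallback = ["#E91E63", "#2196F3", "#FF9800", "#4CAF50", "#9C27B0", "#00BCD4"]
--     out: Dict[int, str] = {}
--     fb = 0
--     for t in sorted(set(tools)):
--         if t < len(extruder_hex) and extruder_hex[t]: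
--             hx = extruder_hex[t]
--             out[t] = hx if hx.startswith("#") else "#" + hx
--         else:
--             out[t] = fallback[fb % len(fallback)]
--             fb += 1
--     return out
-- ===== SOURCE B (Python) =====
-- from typing import Dict, List, Optional, Sequence, Set, Tuple
--
--
-- def default_colors_for_tools(tools: Sequence[int], extruder_hex: Sequence[str]) -> Dict[int, str]:
--     """Map tool index -> #RRGGBB from slicer extruder_colour or distinct fallbacks."""
--     fallback = ["#E91E63", "#2196F3", "#FF9800", "#4CAF50", "#9C27B0", "#00BCD4"]
--     uniq = sorted(set(tools))
--
--     def has_hex(t: int) -> bool: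
--         return t < len(extruder_hex) and bool(extruder_hex[t])
--
--     def norm(hx: str) -> str:
--         return hx if hx.startswith("#") else "#" + hx
--
--     # Stateless: a fallback tool's color index is its rank among the
--     # fallback-needing tools, i.e. the count of smaller ones (uniq is sorted).
--     return {t: norm(extruder_hex[t]) if has_hex(t)
--             else fallback[sum(1 for u in uniq if u < t and not has_hex(u)) % 6]
--             for t in uniq}
-- ===== Notes on version B (the rewrite author's own statement) =====
-- stated objective: alternative
-- what changed: B removes A's threaded fallback counter entirely: a fallback tool's color index is computed statelessly as its rank among fallback-needing tools (count of smaller fallback-needing unique tools), and the dict is built in one comprehension over sorted(set(tools)).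
import Mathlib
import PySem

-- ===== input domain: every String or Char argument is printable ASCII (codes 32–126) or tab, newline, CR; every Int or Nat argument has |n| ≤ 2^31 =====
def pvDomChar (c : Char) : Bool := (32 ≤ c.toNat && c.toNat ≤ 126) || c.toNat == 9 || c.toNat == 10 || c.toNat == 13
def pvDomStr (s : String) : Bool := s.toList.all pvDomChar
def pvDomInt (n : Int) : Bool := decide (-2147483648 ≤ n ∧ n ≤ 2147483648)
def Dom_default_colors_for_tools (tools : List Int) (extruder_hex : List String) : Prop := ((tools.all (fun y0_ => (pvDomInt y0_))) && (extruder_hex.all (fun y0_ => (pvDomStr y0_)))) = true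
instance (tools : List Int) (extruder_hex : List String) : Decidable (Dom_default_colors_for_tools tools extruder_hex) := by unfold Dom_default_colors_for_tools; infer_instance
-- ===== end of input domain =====

-- B drops A's threaded fallback counter: a fallback tool's color index is computed statelessly
-- as the count of smaller fallback-needing unique tools (alternative decomposition, not faster).

-- ===== PORT A =====
def pvFallback : List String :=
  ["#E91E63", "#2196F3", "#FF9800", "#4CAF50", "#9C27B0", "#00BCD4"]

-- hx if hx.startswith("#") else "#" + hx
def pvAddHash (hx : String) : String :=
  if PySem.Str.startswith hx "#" then hx else "#" ++ hx

def default_colors_for_tools (tools : List Int) (extruder_hex : List String) : List (Int × String) :=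
  -- out = {}; fb = 0; for t in sorted(set(tools)): …  (extruder_hex[t] as pyGetD; Pre_ excludes the IndexError case)
  ((PySem.List.sorted (PySem.Set.ofList tools) (fun t => t) false).foldl
    (fun (st : PySem.Dict Int String × Int) t =>
      if t < (extruder_hex.length : Int) ∧ PySem.List.pyGetD extruder_hex t "" ≠ "" then
        (st.1.insert t (pvAddHash (PySem.List.pyGetD extruder_hex t "")), st.2)
      else
        (st.1.insert t (PySem.List.pyGetD pvFallback (PySem.Int.mod st.2 6) ""), st.2 + 1))
    (PySem.Dict.empty, 0)).1.items

-- ===== PORT B =====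
-- def has_hex(t): return t < len(extruder_hex) and bool(extruder_hex[t])
def pvHasHex (extruder_hex : List String) (t : Int) : Bool :=
  decide (t < (extruder_hex.length : Int)) && decide (PySem.List.pyGetD extruder_hex t "" ≠ "")

def default_colors_for_tools_alt (tools : List Int) (extruder_hex : List String) : List (Int × String) :=
  let uniq := PySem.List.sorted (PySem.Set.ofList tools) (fun t => t) false
  -- {t: norm(extruder_hex[t]) if has_hex(t) else fallback[sum(1 for u in uniq if u < t and not has_hex(u)) % 6] for t in uniq}
  (uniq.foldl
    (fun (d : PySem.Dict Int String) t =>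
      d.insert t
        (if pvHasHex extruder_hex t then pvAddHash (PySem.List.pyGetD extruder_hex t "")
         else PySem.List.pyGetD pvFallback
           (PySem.Int.mod
             (((uniq.filter (fun u => decide (u < t) && !pvHasHex extruder_hex u)).length : Int)) 6) ""))
    PySem.Dict.empty).items

-- ===== PRECONDITION & SPEC =====
-- Pre_ excludes exactly the inputs where A (and B alike) raises IndexError: a tool index below
-- -len(extruder_hex) passes the 't < len' test and then indexes out of range.
def Pre_default_colors_for_tools (tools : List Int) (extruder_hex : List String) : Prop :=
  ∀ t ∈ tools, -(extruder_hex.length : Int) ≤ t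
instance (tools : List Int) (extruder_hex : List String) : Decidable (Pre_default_colors_for_tools tools extruder_hex) := by unfold Pre_default_colors_for_tools; infer_instance

def pvWitness_default_colors_for_tools : List Int × List String := ([0, 1, 5], ["#aa", "bb"])

def Spec_default_colors_for_tools (tools : List Int) (extruder_hex : List String) (out : List (Int × String)) : Prop := out = default_colors_for_tools_alt tools extruder_hex
instance (tools : List Int) (extruder_hex : List String) (out : List (Int × String)) : Decidable (Spec_default_colors_for_tools tools extruder_hex out) := by unfold Spec_default_colors_for_tools; infer_instance

-- ===== CLAIM (what is proved, stated in full; the proofs are below) =====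
def Claim_equal_default_colors_for_tools : Prop := ∀ (tools : List Int) (extruder_hex : List String), Dom_default_colors_for_tools tools extruder_hex → Pre_default_colors_for_tools tools extruder_hex → Spec_default_colors_for_tools tools extruder_hex (default_colors_for_tools tools extruder_hex)

-- ===== LEMMAS AND PROOFS =====

-- reference run of A's loop over the (distinct, sorted) tools, with the fallback counter explicit
def pvRef (extruder_hex : List String) (l : List Int) (fb : Int) : List (Int × String) :=
  match l with
  | [] => []
  | t :: r =>
    if t < (extruder_hex.length : Int) ∧ PySem.List.pyGetD extruder_hex t "" ≠ "" then
      (t, pvAddHash (PySem.List.pyGetD extruder_hex t "")) :: pvRef extruder_hex r fb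
    else
      (t, PySem.List.pyGetD pvFallback (PySem.Int.mod fb 6) "") :: pvRef extruder_hex r (fb + 1)

theorem pvA_loop_eq (extruder_hex : List String) (l : List Int) (d : PySem.Dict Int String) (fb : Int)
    (hnd : d.keys.Nodup) (hfresh : ∀ t ∈ l, d.contains t = false) (hl : l.Nodup) :
    (l.foldl
      (fun (st : PySem.Dict Int String × Int) t =>
        if t < (extruder_hex.length : Int) ∧ PySem.List.pyGetD extruder_hex t "" ≠ "" then
          (st.1.insert t (pvAddHash (PySem.List.pyGetD extruder_hex t "")), st.2)
        else
          (st.1.insert t (PySem.List.pyGetD pvFallback (PySem.Int.mod st.2 6) ""), st.2 + 1))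
      (d, fb)).1.items = d.items ++ pvRef extruder_hex l fb := by
  induction l generalizing d fb with
  | nil => simp [pvRef]
  | cons t r ih =>
    have htl : t ∉ r := (List.nodup_cons.mp hl).1
    have hrnd : r.Nodup := (List.nodup_cons.mp hl).2
    have hft : d.contains t = false := hfresh t (by simp)
    have hfresh' : ∀ (v : String), ∀ u ∈ r, (d.insert t v).contains u = false := by
      intro v u hu
      have hne : u ≠ t := fun h => htl (h ▸ hu)
      simp [PySem.Dict.contains_insert, hne, hfresh u (List.mem_cons_of_mem _ hu)]
    rw [List.foldl_cons]
    by_cases hc : t < (extruder_hex.length : Int) ∧ PySem.List.pyGetD extruder_hex t "" ≠ ""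
    · rw [if_pos hc, ih _ _ (PySem.Dict.nodup_keys_insert _ _ _ hnd) (hfresh' _) hrnd,
        PySem.Dict.items_insert_of_not_contains _ _ hft]
      simp only [pvRef, if_pos hc, List.append_assoc, List.singleton_append]
    · rw [if_neg hc, ih _ _ (PySem.Dict.nodup_keys_insert _ _ _ hnd) (hfresh' _) hrnd,
        PySem.Dict.items_insert_of_not_contains _ _ hft]
      simp only [pvRef, if_neg hc, List.append_assoc, List.singleton_append]

-- in a strictly increasing list pre ++ t :: r, the tools below t needing fallback are exactly
-- the fallback-needing tools of pre
theorem pvRank_eq (extruder_hex : List String) (pre r : List Int) (t : Int)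
    (hp : (pre ++ t :: r).Pairwise (· < ·)) :
    (pre ++ t :: r).filter (fun u => decide (u < t) && !pvHasHex extruder_hex u)
      = pre.filter (fun u => !pvHasHex extruder_hex u) := by
  obtain ⟨hpre, hmid, hcross⟩ := List.pairwise_append.mp hp
  have hlt : ∀ u ∈ pre, u < t := fun u hu => hcross u hu t (by simp)
  have hgt : ∀ u ∈ r, t < u := (List.pairwise_cons.mp hmid).1
  rw [List.filter_append, List.filter_cons]
  have h1 : pre.filter (fun u => decide (u < t) && !pvHasHex extruder_hex u)
      = pre.filter (fun u => !pvHasHex extruder_hex u) := by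
    apply List.filter_congr
    intro u hu
    simp [hlt u hu]
  have h2 : (decide (t < t) && !pvHasHex extruder_hex t) = false := by simp
  have h3 : r.filter (fun u => decide (u < t) && !pvHasHex extruder_hex u) = [] := by
    apply List.filter_eq_nil_iff.mpr
    intro u hu
    have := hgt u hu
    simp; omega
  rw [h1, h2, h3]
  simp

-- B's per-tool value over the tail l of uniq = pre ++ l equals A's counter run started at
-- the number of fallback-needing tools already seen in pre
theorem pvB_map_eq_ref (extruder_hex : List String) (pre l : List Int)
    (hp : (pre ++ l).Pairwise (· < ·)) :
    l.map (fun t => (t,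
        if pvHasHex extruder_hex t then pvAddHash (PySem.List.pyGetD extruder_hex t "")
        else PySem.List.pyGetD pvFallback
          (PySem.Int.mod
            ((((pre ++ l).filter (fun u => decide (u < t) && !pvHasHex extruder_hex u)).length : Int)) 6) ""))
      = pvRef extruder_hex l (((pre.filter (fun u => !pvHasHex extruder_hex u)).length : Int)) := by
  induction l generalizing pre with
  | nil => simp [pvRef]
  | cons t r ih =>
    have hA : (pvHasHex extruder_hex t = true)
        ↔ (t < (extruder_hex.length : Int) ∧ PySem.List.pyGetD extruder_hex t "" ≠ "") := by
      simp [pvHasHex]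
    have hrank := pvRank_eq extruder_hex pre r t hp
    have hp' : ((pre ++ [t]) ++ r).Pairwise (· < ·) := by simpa using hp
    have ih' := ih (pre ++ [t]) hp'
    rw [show (pre ++ [t]) ++ r = pre ++ t :: r from by simp] at ih'
    rw [List.map_cons]
    by_cases hh : pvHasHex extruder_hex t
    · have hc : t < (extruder_hex.length : Int) ∧ PySem.List.pyGetD extruder_hex t "" ≠ "" := hA.mp hh
      have hfilt : (pre ++ [t]).filter (fun u => !pvHasHex extruder_hex u)
          = pre.filter (fun u => !pvHasHex extruder_hex u) := by
        rw [List.filter_append]; simp [hh]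
      rw [hfilt] at ih'
      simp only [pvRef, if_pos hc]
      rw [if_pos hh, ih']
    · have hc : ¬ (t < (extruder_hex.length : Int) ∧ PySem.List.pyGetD extruder_hex t "" ≠ "") :=
        fun h => hh (hA.mpr h)
      have hfilt : (pre ++ [t]).filter (fun u => !pvHasHex extruder_hex u)
          = pre.filter (fun u => !pvHasHex extruder_hex u) ++ [t] := by
        rw [List.filter_append]
        simp [hh]
      rw [hfilt] at ih'
      simp only [pvRef, if_neg hc]
      rw [if_neg hh, hrank, ih']
      congr 2
      simp

-- ===== VERDICT (by name: the statement is the Claim_ definition above) =====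
theorem default_colors_for_tools_spec : Claim_equal_default_colors_for_tools := by
  intro tools extruder_hex _ _
  show default_colors_for_tools tools extruder_hex = default_colors_for_tools_alt tools extruder_hex
  have hplt : (PySem.List.sorted (PySem.Set.ofList tools) (fun t => t) false).Pairwise (· < ·) :=
    PySem.List.sorted_ofList_pairwise_lt tools
  have hund : (PySem.List.sorted (PySem.Set.ofList tools) (fun t => t) false).Nodup :=
    hplt.imp (fun h => ne_of_lt h)
  have hA : default_colors_for_tools tools extruder_hex
      = pvRef extruder_hex (PySem.List.sorted (PySem.Set.ofList tools) (fun t => t) false) 0 := by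
    unfold default_colors_for_tools
    rw [pvA_loop_eq extruder_hex _ PySem.Dict.empty 0 (by decide) (by simp) hund]
    rw [show (PySem.Dict.empty : PySem.Dict Int String).items = [] from rfl, List.nil_append]
  have hB : default_colors_for_tools_alt tools extruder_hex
      = (PySem.List.sorted (PySem.Set.ofList tools) (fun t => t) false).map
          (fun t => (t,
            if pvHasHex extruder_hex t then pvAddHash (PySem.List.pyGetD extruder_hex t "")
            else PySem.List.pyGetD pvFallback
              (PySem.Int.mod
                ((((PySem.List.sorted (PySem.Set.ofList tools) (fun t => t) false).filter
                  (fun u => decide (u < t) && !pvHasHex extruder_hex u)).length : Int)) 6) "")) := by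
    show ((PySem.List.sorted (PySem.Set.ofList tools) (fun t => t) false).foldl
        (fun (d : PySem.Dict Int String) t => d.insert t _) PySem.Dict.empty).items = _
    rw [PySem.Dict.items_foldl_insert_fresh _ (fun t => t) _ _ (by simp) (by simpa using hund)]
    rw [show (PySem.Dict.empty : PySem.Dict Int String).items = [] from rfl, List.nil_append]
  rw [hA, hB]
  have hmain := pvB_map_eq_ref extruder_hex []
    (PySem.List.sorted (PySem.Set.ofList tools) (fun t => t) false) (by simpa using hplt)
  simp only [List.nil_append, List.filter_nil, List.length_nil, Nat.cast_zero] at hmain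
  exact hmain.symm
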